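-- pv_equiv track=rewrite | github.com/mr-asa/comfyui_utils | update_workflow_repos.py | _is_rel_path_safe
-- ===== SOURCE A (Python) =====
-- def _windows_path_is_invalid(repo_rel_path: str) -> bool:
--     """
--     Best-effort check for filenames that Windows cannot represent.
--     This is not exhaustive, but catches the common hard failures (e.g. '|', '*', '?', etc).
--     """
--     invalid_chars = set('<>:"|?*')
--     parts = repo_rel_path.split("/")
--     for part in parts:
--         if not part:
--             continue
--         if any(c in invalid_chars for c in part):
--             return True
--         if part.endswith(" ") or part.endswith("."):
--             return True
--     return False
--
-- def _is_rel_path_safe(rel: str) -> bool: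
--     if not rel:
--         return False
--     if rel.startswith(("/", "\\")):
--         return False
--     if "\\" in rel:
--         return False
--     parts = rel.split("/")
--     if any(part in {"", ".", ".."} for part in parts):
--         return False
--     return not _windows_path_is_invalid(rel)
-- ===== SOURCE B (Python) =====
-- def _is_rel_path_safe(rel: str) -> bool:
--     """Single character-level scan with a one-char lookbehind; no splitting.
--
--     A component boundary (a '/' or the end of the string, marked by a
--     sentinel '/') is unsafe exactly when the previous character is itself a
--     boundary (empty component, which also covers the empty string, leading
--     and trailing slashes) or a space or a dot (a forbidden component ending,
--     which also subsumes the '.' and '..' components).  Any occurrence of a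
--     forbidden character, including the backslash, is unsafe on its own.
--     """
--     prev = "/"
--     for c in rel + "/":
--         if c == "/":
--             if prev in "/ .":
--                 return False
--         elif c in '<>:"|?*\\':
--             return False
--         prev = c
--     return True
-- ===== Notes on version B (the rewrite author's own statement) =====
-- stated objective: alternative
-- what changed: Replaced A's split-into-parts pipeline (split, an any(...) over the parts, and a helper that re-splits and loops again) with a single character-level scan carrying only a one-char lookbehind: a '/' (or a sentinel terminator) is unsafe iff the previous char is '/', ' ' or '.', which subsumes the empty, '.' and '..' component checks and the endswith checks, and '\\' is folded into the forbidden-character set.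
import Mathlib
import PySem

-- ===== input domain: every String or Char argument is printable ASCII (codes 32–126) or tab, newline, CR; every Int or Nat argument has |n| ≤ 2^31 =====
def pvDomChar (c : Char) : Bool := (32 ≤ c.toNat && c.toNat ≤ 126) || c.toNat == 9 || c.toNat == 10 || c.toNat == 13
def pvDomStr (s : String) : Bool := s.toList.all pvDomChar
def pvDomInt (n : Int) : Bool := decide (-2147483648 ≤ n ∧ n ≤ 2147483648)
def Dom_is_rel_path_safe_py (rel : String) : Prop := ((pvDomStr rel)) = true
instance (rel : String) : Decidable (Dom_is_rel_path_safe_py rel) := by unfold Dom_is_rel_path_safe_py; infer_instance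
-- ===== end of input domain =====

-- B replaces A's split-into-parts pipeline by a single character scan with a one-char
-- lookbehind (no splitting, no intermediate part lists); same values everywhere.

-- ===== PORT A =====
-- invalid_chars = set('<>:"|?*')
def pvInvalidChars : List Char := ['<', '>', ':', '"', '|', '?', '*']

-- the for-loop of _windows_path_is_invalid, over the parts
def pvWinLoop : List (List Char) → Bool
  | [] => false
  | part :: rest =>
    if part == [] then pvWinLoop rest
    else if part.any (fun c => pvInvalidChars.contains c) then true
    else if PySem.Chars.endswith part [' '] || PySem.Chars.endswith part ['.'] then true
    else pvWinLoop rest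

def windows_path_is_invalid_py (repo_rel_path : String) : Bool :=
  pvWinLoop (PySem.Chars.splitOn repo_rel_path.toList ['/'])

def is_rel_path_safe_py (rel : String) : Bool :=
  if rel.toList == [] then false
  else if PySem.Chars.startswith rel.toList ['/'] || PySem.Chars.startswith rel.toList ['\\'] then false
  -- '"\\" in rel' with a one-character needle is exactly character membership
  else if rel.toList.contains '\\' then false
  else
    if (PySem.Chars.splitOn rel.toList ['/']).any
        (fun p => p == [] || p == ['.'] || p == ['.', '.']) then false
    else !(windows_path_is_invalid_py rel)

-- ===== PORT B =====
-- the string literal '<>:"|?*\\' of B's membership test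
def pvBad8 : List Char := ['<', '>', ':', '"', '|', '?', '*', '\\']

-- B's for-loop over rel + "/": the state is the previous character only
def pvScan : List Char → Char → Bool
  | [], _ => true
  | c :: rest, prev =>
    if c == '/' then
      -- 'prev in "/ ."': one-character membership in the three-char string
      if ['/', ' ', '.'].contains prev then false else pvScan rest c
    else if pvBad8.contains c then false
    else pvScan rest c

def is_rel_path_safe_py_alt (rel : String) : Bool :=
  pvScan (rel.toList ++ ['/']) '/'

-- ===== PRECONDITION & SPEC =====
def Spec_is_rel_path_safe_py (rel : String) (out : Bool) : Prop := out = is_rel_path_safe_py_alt rel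
instance (rel : String) (out : Bool) : Decidable (Spec_is_rel_path_safe_py rel out) := by unfold Spec_is_rel_path_safe_py; infer_instance

-- ===== CLAIM (what is proved, stated in full; the proofs are below) =====
def Claim_equal_is_rel_path_safe_py : Prop := ∀ (rel : String), Dom_is_rel_path_safe_py rel → Spec_is_rel_path_safe_py rel (is_rel_path_safe_py rel)

-- ===== LEMMAS AND PROOFS =====

-- structural recursion computing str.split('/') on the character list
def pvSplit : List Char → List (List Char)
  | [] => [[]]
  | c :: rest =>
    if c = '/' then [] :: pvSplit rest
    else
      match pvSplit rest with
      | [] => [[c]]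
      | p :: ps => (c :: p) :: ps

theorem pvSplit_ne_nil (l : List Char) : pvSplit l ≠ [] := by
  cases l with
  | nil => simp [pvSplit]
  | cons c rest =>
    simp only [pvSplit]
    split
    · simp
    · split <;> simp

def pvConsHead (cur : List Char) : List (List Char) → List (List Char)
  | [] => [cur]
  | p :: ps => (cur ++ p) :: ps

theorem pvSplitOn_go_eq (fuel : Nat) (l cur : List Char) (acc : List (List Char))
    (h : l.length < fuel) :
    PySem.Chars.splitOn.go ['/'] fuel l cur acc
      = acc.reverse ++ pvConsHead cur.reverse (pvSplit l) := by
  induction fuel generalizing l cur acc with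
  | zero => omega
  | succ f ih =>
    cases l with
    | nil =>
      simp [PySem.Chars.splitOn.go, pvSplit, pvConsHead]
    | cons c rest =>
      rw [PySem.Chars.splitOn.go]
      by_cases hc : c = '/'
      · subst hc
        have hpre : List.isPrefixOf ['/'] ('/' :: rest) = true := by simp [List.isPrefixOf]
        simp only [hpre, if_pos]
        rw [ih _ _ _ (by simpa using Nat.lt_of_succ_lt_succ h)]
        obtain ⟨p, ps, hps⟩ : ∃ p ps, pvSplit rest = p :: ps := by
          cases hh : pvSplit rest with
          | nil => exact absurd hh (pvSplit_ne_nil rest)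
          | cons p ps => exact ⟨p, ps, rfl⟩
        simp [pvSplit, pvConsHead, hps]
      · have hpre : List.isPrefixOf ['/'] (c :: rest) = false := by
          simp [List.isPrefixOf]; exact fun hh => absurd hh.symm hc
        simp only [hpre, Bool.false_eq_true, if_false]
        rw [ih _ _ _ (by simpa using Nat.lt_of_succ_lt_succ h)]
        obtain ⟨p, ps, hps⟩ : ∃ p ps, pvSplit rest = p :: ps := by
          cases hh : pvSplit rest with
          | nil => exact absurd hh (pvSplit_ne_nil rest)
          | cons p ps => exact ⟨p, ps, rfl⟩
        simp [pvSplit, pvConsHead, hps, hc]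

theorem pvSplitOn_eq (l : List Char) :
    PySem.Chars.splitOn l ['/'] = pvSplit l := by
  rw [PySem.Chars.splitOn, pvSplitOn_go_eq (l.length + 1) l [] [] (by omega)]
  cases hh : pvSplit l with
  | nil => exact absurd hh (pvSplit_ne_nil l)
  | cons p ps => simp [pvConsHead]

-- A's per-part failure predicates, read off A's loops
def pvDotty (p : List Char) : Bool := p == [] || p == ['.'] || p == ['.', '.']

def pvWinBad (p : List Char) : Bool :=
  !(p == []) && (p.any (fun c => pvInvalidChars.contains c)
    || PySem.Chars.endswith p [' '] || PySem.Chars.endswith p ['.'])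

theorem pvWinLoop_eq_any (parts : List (List Char)) :
    pvWinLoop parts = parts.any pvWinBad := by
  induction parts with
  | nil => rfl
  | cons part rest ih =>
    simp only [pvWinLoop, List.any_cons, pvWinBad]
    cases hp : (part == []) with
    | true => simp [ih]
    | false =>
      cases ha : part.any (fun c => pvInvalidChars.contains c) with
      | true => simp
      | false =>
        cases he : (PySem.Chars.endswith part [' '] || PySem.Chars.endswith part ['.']) with
        | true => simp [he]
        | false => simp [he, ih]

-- B's per-part predicates, read off the scan
def pvGoodTail : Char → List Char → Bool
  | last, [] => !(last == ' ' || last == '.')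
  | _, c :: cs => !(pvBad8.contains c) && pvGoodTail c cs

def pvGood : List Char → Bool
  | [] => false
  | c :: cs => !(pvBad8.contains c) && pvGoodTail c cs

def pvStep (prev : Char) : List (List Char) → Bool
  | [] => true
  | p :: ps => (if prev == '/' then pvGood p else pvGoodTail prev p) && ps.all pvGood

theorem pvStep_slash (l : List Char) :
    pvStep '/' (pvSplit l) = (pvSplit l).all pvGood := by
  cases hh : pvSplit l with
  | nil => exact absurd hh (pvSplit_ne_nil l)
  | cons p ps => simp [pvStep, List.all_cons]

theorem pvScan_eq_step (l : List Char) (prev : Char) :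
    pvScan (l ++ ['/']) prev = pvStep prev (pvSplit l) := by
  induction l generalizing prev with
  | nil =>
    by_cases h1 : prev = '/' <;> by_cases h2 : prev = ' ' <;> by_cases h3 : prev = '.' <;>
      simp [pvScan, pvSplit, pvStep, pvGood, pvGoodTail, h1, h2, h3]
  | cons c rest ih =>
    simp only [List.cons_append, pvScan]
    by_cases hc : c = '/'
    · subst hc
      by_cases h1 : prev = '/'
      · subst h1
        simp [pvSplit, pvStep, pvGood]
      · by_cases h2 : prev = ' '
        · subst h2
          simp [pvSplit, pvStep, pvGoodTail]
        · by_cases h3 : prev = '.'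
          · subst h3
            simp [pvSplit, pvStep, pvGoodTail]
          · have hb1 : (prev == '/') = false := by simp [h1]
            have hb2 : (prev == ' ') = false := by simp [h2]
            have hb3 : (prev == '.') = false := by simp [h3]
            have hcc : (['/', ' ', '.'] : List Char).contains prev = false := by
              simp [List.contains_eq_mem, h1, h2, h3]
            simp only [hcc, Bool.false_eq_true, if_false, ih, pvStep_slash]
            simp [pvSplit, pvStep, pvGoodTail, hb1, hb2, hb3]
    · have hcb : (c == '/') = false := by simp [hc]
      simp only [hcb, Bool.false_eq_true, if_false, pvSplit, hc, ih]
      cases hh : pvSplit rest with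
      | nil => exact absurd hh (pvSplit_ne_nil rest)
      | cons p ps =>
        simp only [pvStep, pvGood, pvGoodTail, hcb, Bool.false_eq_true, if_false]
        cases hbad : pvBad8.contains c with
        | true => simp
        | false =>
          by_cases hp : (prev == '/') = true <;> simp [hp]

theorem pvEndswith_single (cs : List Char) (c x : Char) :
    PySem.Chars.endswith (c :: cs) [x] = (cs.getLastD c == x) := by
  induction cs generalizing c with
  | nil =>
    simp only [PySem.Chars.endswith, List.isSuffixOf, List.reverse_cons, List.reverse_nil,
      List.nil_append, List.isPrefixOf, List.getLastD_nil, Bool.and_true]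
    exact BEq.comm
  | cons d cs ih =>
    rw [List.getLastD_cons, ← ih d]
    apply Bool.eq_iff_iff.mpr
    rw [PySem.Chars.endswith_iff, List.suffix_cons_iff, ← PySem.Chars.endswith_iff]
    constructor
    · rintro (hh | hh)
      · exact absurd (congrArg List.length hh) (by simp)
      · exact hh
    · intro hh; right; exact hh

theorem pvGoodTail_eq (cs : List Char) (last : Char) :
    pvGoodTail last cs
      = (!(cs.any (fun c => pvBad8.contains c))
          && !(cs.getLastD last == ' ' || cs.getLastD last == '.')) := by
  induction cs generalizing last with
  | nil => simp [pvGoodTail]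
  | cons c cs ih =>
    rw [List.getLastD_cons]
    simp only [pvGoodTail, ih, List.any_cons, Bool.not_or, Bool.and_assoc]

theorem pvAny8 (cs : List Char) :
    cs.any (fun c => pvBad8.contains c)
      = (cs.any (fun c => pvInvalidChars.contains c) || cs.contains '\\') := by
  induction cs with
  | nil => simp
  | cons c cs ih =>
    simp only [List.any_cons, List.contains_cons, ih]
    have hsplit : pvBad8.contains c = (pvInvalidChars.contains c || decide (c = '\\')) := by
      simp [pvBad8, pvInvalidChars, Bool.or_assoc]
    have hc : (('\\' : Char) == c) = decide (c = '\\') := by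
      rw [BEq.comm]; exact Bool.beq_eq_decide_eq c '\\'
    rw [hsplit]
    simp only [List.contains_eq_mem] at *
    rw [hc]
    generalize decide (c ∈ pvInvalidChars) = a
    generalize (decide (c = '\\') : Bool) = b
    generalize cs.any (fun c => decide (c ∈ pvInvalidChars)) = d
    generalize (decide (('\\':Char) ∈ cs) : Bool) = e
    cases a <;> cases b <;> cases d <;> cases e <;> rfl

theorem pvAny8' (cs : List Char) :
    cs.any (fun c => decide (c ∈ pvBad8))
      = (cs.any (fun c => decide (c ∈ pvInvalidChars)) || decide (('\\':Char) ∈ cs)) := by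
  simpa [List.contains_eq_mem] using pvAny8 cs

-- the per-part identity: B's component predicate = A's three component predicates
theorem pvGood_eq (p : List Char) :
    pvGood p = (!(pvDotty p) && !(pvWinBad p) && !(p.contains '\\')) := by
  cases p with
  | nil => simp [pvGood, pvDotty]
  | cons c cs =>
    have hnil : ((c :: cs : List Char) == []) = false := by simp
    have hc : (('\\' : Char) == c) = decide (c = '\\') := by
      rw [BEq.comm]; exact Bool.beq_eq_decide_eq c '\\'
    have hmem : (decide (('\\':Char) ∈ c :: cs) : Bool) = (decide (c = '\\') || decide (('\\':Char) ∈ cs)) := by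
      simp [List.mem_cons, eq_comm]
    simp only [pvGood, pvGoodTail_eq, pvWinBad, pvDotty, pvEndswith_single,
      List.any_cons, List.contains_eq_mem, pvAny8', hmem, hnil,
      Bool.not_false, Bool.true_and, Bool.false_or]
    have hsplit : (decide (c ∈ pvBad8) : Bool) = (decide (c ∈ pvInvalidChars) || decide (c = '\\')) := by
      simp [pvBad8, pvInvalidChars, Bool.or_assoc]
    rw [hsplit]
    by_cases hD : (cs.getLastD c == '.') = true
    · simp only [hD]
      generalize (decide (c ∈ pvInvalidChars) : Bool) = a
      generalize (decide (c = '\\') : Bool) = b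
      generalize cs.any (fun x => decide (x ∈ pvInvalidChars)) = d
      generalize (decide (('\\':Char) ∈ cs) : Bool) = e
      generalize (cs.getLastD c == ' ') = S
      generalize ((c :: cs : List Char) == ['.']) = q1
      generalize ((c :: cs : List Char) == ['.', '.']) = q2
      cases a <;> cases b <;> cases d <;> cases e <;> cases S <;> cases q1 <;> cases q2 <;> rfl
    · have h1 : ((c :: cs : List Char) == ['.']) = false := by
        apply Bool.eq_false_iff.mpr; intro hh
        rw [beq_iff_eq] at hh
        simp only [List.cons.injEq] at hh
        obtain ⟨rfl, rfl⟩ := hh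
        simp [List.getLastD] at hD
      have h2 : ((c :: cs : List Char) == ['.', '.']) = false := by
        apply Bool.eq_false_iff.mpr; intro hh
        rw [beq_iff_eq] at hh
        simp only [List.cons.injEq] at hh
        obtain ⟨rfl, rfl⟩ := hh
        simp [List.getLastD] at hD
      rw [Bool.not_eq_true] at hD
      simp only [h1, h2, hD]
      generalize (decide (c ∈ pvInvalidChars) : Bool) = a
      generalize (decide (c = '\\') : Bool) = b
      generalize cs.any (fun x => decide (x ∈ pvInvalidChars)) = d
      generalize (decide (('\\':Char) ∈ cs) : Bool) = e
      generalize (cs.getLastD c == ' ') = S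
      cases a <;> cases b <;> cases d <;> cases e <;> cases S <;> rfl

theorem pvAllGood_eq (parts : List (List Char)) :
    parts.all pvGood
      = (!(parts.any pvDotty) && !(parts.any pvWinBad)
          && !(parts.any (fun p => p.contains '\\'))) := by
  induction parts with
  | nil => rfl
  | cons p ps ih =>
    simp only [List.all_cons, List.any_cons, ih, pvGood_eq]
    generalize pvDotty p = a
    generalize pvWinBad p = b
    generalize p.contains '\\' = e
    generalize ps.any pvDotty = a'
    generalize ps.any pvWinBad = b'
    generalize ps.any (fun p => p.contains '\\') = e'
    cases a <;> cases b <;> cases e <;> cases a' <;> cases b' <;> cases e' <;> rfl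

theorem pvContains_split (l : List Char) (x : Char) (hx : x ≠ '/') :
    (pvSplit l).any (fun p => p.contains x) = l.contains x := by
  induction l with
  | nil => simp [pvSplit]
  | cons c rest ih =>
    simp only [pvSplit]
    by_cases hc : c = '/'
    · subst hc
      have ih' : ((pvSplit rest).any fun p => decide (x ∈ p)) = decide (x ∈ rest) := by
        simpa using ih
      simp [List.any_cons, ih', hx]
    · cases hh : pvSplit rest with
      | nil => exact absurd hh (pvSplit_ne_nil rest)
      | cons p ps =>
        have ih' : (decide (x ∈ p) || ps.any fun q => decide (x ∈ q)) = decide (x ∈ rest) := by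
          simpa [hh] using ih
        simp only [hc, if_false, List.any_cons, List.contains_cons]
        simp only [List.contains_eq_mem] at *
        simp [Bool.or_assoc, ih']

-- ===== VERDICT (by name: the statement is the Claim_ definition above) =====
theorem is_rel_path_safe_py_spec : Claim_equal_is_rel_path_safe_py := by
  intro rel _
  unfold Spec_is_rel_path_safe_py is_rel_path_safe_py is_rel_path_safe_py_alt
    windows_path_is_invalid_py
  rw [pvScan_eq_step, pvStep_slash, pvSplitOn_eq, pvAllGood_eq, pvWinLoop_eq_any]
  cases hl : rel.toList with
  | nil => simp [pvSplit, pvDotty]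
  | cons c rest =>
    by_cases hc : c = '/'
    · subst hc
      simp [PySem.Chars.startswith, List.isPrefixOf, pvSplit, pvDotty]
    · by_cases hb : c = '\\'
      · subst hb
        have hcon : (pvSplit ('\\' :: rest)).any (fun p => p.contains '\\') = true := by
          rw [pvContains_split _ _ (by decide)]
          simp
        have hsw2 : PySem.Chars.startswith ('\\' :: rest) ['\\'] = true := by
          simp [PySem.Chars.startswith, List.isPrefixOf]
        simp only [show (('\\' :: rest : List Char) == []) = false from by simp,
          Bool.false_eq_true, if_false, hsw2, Bool.or_true, if_true, hcon,
          Bool.not_true, Bool.and_false]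
      · have hsw : PySem.Chars.startswith (c :: rest) ['/'] = false := by
          simp [PySem.Chars.startswith, List.isPrefixOf]
          exact fun hh => hc hh.symm
        have hsw2 : PySem.Chars.startswith (c :: rest) ['\\'] = false := by
          simp [PySem.Chars.startswith, List.isPrefixOf]
          exact fun hh => hb hh.symm
        rw [pvContains_split _ _ (by decide)]
        simp only [hsw, hsw2, Bool.or_self, Bool.false_eq_true, if_false]
        cases hcon : (c :: rest).contains '\\' with
        | true => simp
        | false =>
          cases hdot : (pvSplit (c :: rest)).any pvDotty with
          | true =>
            simp only [show (fun p : List Char => p == [] || p == ['.'] || p == ['.', '.']) = pvDotty from rfl,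
              show ((c :: rest : List Char) == []) = false from by simp,
              hdot, Bool.false_eq_true, if_false, if_true,
              Bool.not_true, Bool.false_and]
          | false =>
            simp only [show (fun p : List Char => p == [] || p == ['.'] || p == ['.', '.']) = pvDotty from rfl,
              show ((c :: rest : List Char) == []) = false from by simp,
              hdot, Bool.false_eq_true, if_false, Bool.not_false,
              Bool.true_and, Bool.and_true]
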